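-- pv_equiv track=rewrite | github.com/kolt07/pazuzu | business/services/prozorro_service.py | _is_active_status
-- ===== SOURCE A (Python) =====
-- def _is_active_status(status: str) -> bool:
--     """
--     Перевіряє, чи статус аукціону є активним.
--
--     Args:
--         status: Статус аукціону
--
--     Returns:
--         bool: True якщо статус активний
--     """
--     active_statuses = ['active', 'active.tendering', 'active.auction', 'active.qualification',
--                       'active_rectification', 'active_tendering', 'active_auction', 'active_qualification']
--
--     return any(
--         status.startswith(active_status.replace('_', '.')) or
--         status == active_status or
--         status.startswith(active_status.replace('.', '_'))
--         for active_status in active_statuses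
--     )
-- ===== SOURCE B (Python) =====
-- def _is_active_status(status: str) -> bool:
--     """True iff the auction status is active.
--
--     Every entry of A's list begins with 'active' and the bare entry 'active'
--     is itself in the list, so the whole any() reduces to one prefix test.
--     """
--     return status.startswith('active')
-- ===== Notes on version B (the rewrite author's own statement) =====
-- stated objective: simpler
-- what changed: The scan over eight status strings with replace('_','.')/replace('.','_') and three tests each collapses to the single prefix test status.startswith('active'), which the list's first entry makes equivalent.
import Mathlib
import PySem

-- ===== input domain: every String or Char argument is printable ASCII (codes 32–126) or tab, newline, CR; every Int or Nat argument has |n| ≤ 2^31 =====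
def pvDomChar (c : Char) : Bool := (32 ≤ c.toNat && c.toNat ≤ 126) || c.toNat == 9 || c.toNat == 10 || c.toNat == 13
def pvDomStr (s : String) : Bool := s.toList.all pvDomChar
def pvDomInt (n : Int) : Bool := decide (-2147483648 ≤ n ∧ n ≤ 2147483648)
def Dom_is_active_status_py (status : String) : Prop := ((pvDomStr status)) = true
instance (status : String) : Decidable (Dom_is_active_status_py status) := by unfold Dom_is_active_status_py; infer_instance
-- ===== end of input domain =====

-- B replaces A's scan over eight status strings (three tests each) by the single
-- prefix test status.startswith('active'); objective: simpler.

-- ===== PORT A =====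
def is_active_status_py (status : String) : Bool :=
  let active_statuses : List String :=
    ["active", "active.tendering", "active.auction", "active.qualification",
     "active_rectification", "active_tendering", "active_auction", "active_qualification"]
  active_statuses.any (fun active_status =>
    PySem.Str.startswith status (PySem.Str.replace active_status "_" ".") ||
    status == active_status ||
    PySem.Str.startswith status (PySem.Str.replace active_status "." "_"))

-- ===== PORT B =====
def is_active_status_py_alt (status : String) : Bool :=
  PySem.Str.startswith status "active"

-- ===== PRECONDITION & SPEC =====
def Spec_is_active_status_py (status : String) (out : Bool) : Prop := out = is_active_status_py_alt status
instance (status : String) (out : Bool) : Decidable (Spec_is_active_status_py status out) := by unfold Spec_is_active_status_py; infer_instance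

-- ===== CLAIM (what is proved, stated in full; the proofs are below) =====
def Claim_equal_is_active_status_py : Prop := ∀ (status : String), Dom_is_active_status_py status → Spec_is_active_status_py status (is_active_status_py status)

-- ===== LEMMAS AND PROOFS =====

-- If p starts with "active" and status does not, then status does not start with p.
theorem pv_sw_false (s p : String) (hp : "active".toList <+: p.toList)
    (h : PySem.Str.startswith s "active" = false) :
    PySem.Str.startswith s p = false := by
  simp only [PySem.Str.startswith_eq] at *
  rw [Bool.eq_false_iff] at h ⊢
  intro hpf
  exact h ((PySem.Chars.startswith_iff _ _).mpr
    (hp.trans ((PySem.Chars.startswith_iff _ _).mp hpf)))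

-- If p starts with "active" and status does not, then status ≠ p.
theorem pv_eq_false (s p : String) (hp : "active".toList <+: p.toList)
    (h : PySem.Str.startswith s "active" = false) :
    (s == p) = false := by
  rw [beq_eq_false_iff_ne]
  rintro rfl
  rw [Bool.eq_false_iff] at h
  exact h (by rw [PySem.Str.startswith_eq]; exact (PySem.Chars.startswith_iff _ _).mpr hp)

-- ===== VERDICT (by name: the statement is the Claim_ definition above) =====
theorem is_active_status_py_spec : Claim_equal_is_active_status_py := by
  intro status _
  unfold Spec_is_active_status_py is_active_status_py is_active_status_py_alt
  simp only [List.any_cons, List.any_nil, Bool.or_false]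
  cases h : PySem.Str.startswith status "active" with
  | true =>
    rw [show PySem.Str.replace "active" "_" "." = "active" from by decide, h]
    simp
  | false =>
    simp only [pv_sw_false status (PySem.Str.replace "active" "_" ".") (by decide) h,
      pv_sw_false status (PySem.Str.replace "active" "." "_") (by decide) h,
      pv_sw_false status (PySem.Str.replace "active.tendering" "_" ".") (by decide) h,
      pv_sw_false status (PySem.Str.replace "active.tendering" "." "_") (by decide) h,
      pv_sw_false status (PySem.Str.replace "active.auction" "_" ".") (by decide) h,
      pv_sw_false status (PySem.Str.replace "active.auction" "." "_") (by decide) h,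
      pv_sw_false status (PySem.Str.replace "active.qualification" "_" ".") (by decide) h,
      pv_sw_false status (PySem.Str.replace "active.qualification" "." "_") (by decide) h,
      pv_sw_false status (PySem.Str.replace "active_rectification" "_" ".") (by decide) h,
      pv_sw_false status (PySem.Str.replace "active_rectification" "." "_") (by decide) h,
      pv_sw_false status (PySem.Str.replace "active_tendering" "_" ".") (by decide) h,
      pv_sw_false status (PySem.Str.replace "active_tendering" "." "_") (by decide) h,
      pv_sw_false status (PySem.Str.replace "active_auction" "_" ".") (by decide) h,
      pv_sw_false status (PySem.Str.replace "active_auction" "." "_") (by decide) h,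
      pv_sw_false status (PySem.Str.replace "active_qualification" "_" ".") (by decide) h,
      pv_sw_false status (PySem.Str.replace "active_qualification" "." "_") (by decide) h,
      pv_eq_false status "active" (by decide) h,
      pv_eq_false status "active.tendering" (by decide) h,
      pv_eq_false status "active.auction" (by decide) h,
      pv_eq_false status "active.qualification" (by decide) h,
      pv_eq_false status "active_rectification" (by decide) h,
      pv_eq_false status "active_tendering" (by decide) h,
      pv_eq_false status "active_auction" (by decide) h,
      pv_eq_false status "active_qualification" (by decide) h,
      Bool.or_self]
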